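-- pv_equiv track=rewrite | github.com/palomapiot/search-and-learn | src/utils/text_classification.py | find_majority_answer
-- ===== SOURCE A (Python) =====
-- from collections import defaultdict
-- from typing import Any, Dict, List
--
-- def find_majority_answer(answers: List[List[str]]) -> List[str]:
--     """
--     Groups answers (lists of words) based on their canonical forms and finds the group with the largest number of elements.
--     In case of a tie, returns the first occurring group with the largest size.
--
--     Args:
--         answers (list of list of str): A list of answers, where each answer is a list of words.
--
--     Returns:
--         list of str: The list of words representing the group with the largest number of elements.
--
--     Example:
--         answers = [["a", "b"], ["a", "b"], ["c"], ["a", "b", "c"]]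
--         result = find_majority_answer(answers)
--         # result would be ["a", "b"] since it occurs most frequently.
--     """
--     if len(answers) == 0:
--         raise ValueError("answers cannot be empty")
--
--     # Group answers using canonical forms
--     canonical_groups = defaultdict(int)  # Count occurrences for each canonical form
--     canonical_to_original = {}  # Map canonical form back to an original answer
--
--     for answer in answers:
--         # Create a canonical form by sorting and removing duplicates
--         canonical_form = tuple(sorted(set(answer)))
--
--         # Increment count for the canonical form
--         canonical_groups[canonical_form] += 1
--
--         # Track the original answer for this canonical form
--         if canonical_form not in canonical_to_original:
--             canonical_to_original[canonical_form] = answer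
--
--     # Find the canonical form with the largest count
--     max_count = max(canonical_groups.values())
--     for canonical_form, count in canonical_groups.items():
--         if count == max_count:
--             # Return the first occurring group in case of a tie
--             return canonical_to_original[canonical_form]
-- ===== SOURCE B (Python) =====
-- def find_majority_answer(answers):
--     if len(answers) == 0:
--         raise ValueError("answers cannot be empty")
--     # Peel off the entire canonical group of the first remaining answer, keep
--     # the best (size, representative) seen so far; strict '>' keeps the
--     # earliest group on ties. No dict or counter is built.
--     best_cnt, best_ans = 0, None
--     rest = answers
--     while rest:
--         c = tuple(sorted(set(rest[0])))
--         same = [a for a in rest if tuple(sorted(set(a))) == c]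
--         rest_next = [a for a in rest if tuple(sorted(set(a))) != c]
--         if len(same) > best_cnt:
--             best_cnt, best_ans = len(same), rest[0]
--         rest = rest_next
--     return best_ans
-- ===== Notes on version B (the rewrite author's own statement) =====
-- stated objective: alternative
-- what changed: Replaces A's dictionary bookkeeping (a Counter plus a canonical-form-to-first-answer map, then a max over values and a scan of the items) by a group-peeling loop: repeatedly split off the entire canonical group of the first remaining answer and keep the best (size, representative) so far, strict '>' preserving A's first-occurring-group tie-break; no dict or counter is built.
import Mathlib
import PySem

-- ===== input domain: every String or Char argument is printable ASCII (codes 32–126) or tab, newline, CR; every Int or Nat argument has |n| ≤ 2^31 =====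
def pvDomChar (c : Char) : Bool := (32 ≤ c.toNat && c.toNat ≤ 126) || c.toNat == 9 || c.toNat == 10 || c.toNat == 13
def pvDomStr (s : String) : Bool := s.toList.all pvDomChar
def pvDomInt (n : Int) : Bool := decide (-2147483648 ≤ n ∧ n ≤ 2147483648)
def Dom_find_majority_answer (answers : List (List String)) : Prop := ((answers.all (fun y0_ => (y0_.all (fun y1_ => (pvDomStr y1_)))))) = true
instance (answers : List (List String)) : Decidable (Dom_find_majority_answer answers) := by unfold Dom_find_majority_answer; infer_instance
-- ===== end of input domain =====

-- B replaces A's two insertion-ordered dicts by a recursive partition that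
-- peels off one whole canonical group at a time (objective: alternative).

-- canonical form 'tuple(sorted(set(answer)))', shared by both Pythons verbatim
def pvCanon (a : List String) : List String :=
  PySem.List.sorted (PySem.Set.ofList a) (fun x => x) false

-- ===== PORT A =====
def find_majority_answer (answers : List (List String)) : List String :=
  if answers.length = 0 then []   -- Python: raise ValueError (excluded by Pre_)
  else
    let st := answers.foldl
      (fun s answer =>
        let canonical_form := pvCanon answer
        (s.1.modify canonical_form 0 (· + 1),
         if s.2.contains canonical_form then s.2 else s.2.insert canonical_form answer))
      ((PySem.Dict.empty : PySem.Dict (List String) Int),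
       (PySem.Dict.empty : PySem.Dict (List String) (List String)))
    match PySem.List.max? st.1.values (fun v => v) with
    | none => []                  -- unreachable: values nonempty when answers ≠ []
    | some max_count =>
      match st.1.items.find? (fun p => p.2 == max_count) with
      | some p => st.2.getD p.1 []  -- dict lookup always hits; default never used
      | none => []                -- Python falls off the loop returning None: unreachable

-- ===== PORT B =====
-- the while loop: peel off the canonical group of the first remaining answer,
-- keep the best (count, representative) so far (strict '>' keeps the earliest)
def pvBestLoop (best_cnt : Nat) (best_ans : Option (List String)) :
    List (List String) → Nat × Option (List String)
  | [] => (best_cnt, best_ans)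
  | x :: t =>
    let same := (x :: t).filter (fun a => pvCanon a == pvCanon x)
    let rest_next := (x :: t).filter (fun a => !(pvCanon a == pvCanon x))
    if best_cnt < same.length then pvBestLoop same.length (some x) rest_next
    else pvBestLoop best_cnt best_ans rest_next
  termination_by rest => rest.length
  decreasing_by
  · simp only [List.filter_cons, beq_self_eq_true, Bool.not_true, if_neg, Bool.false_eq_true,
      not_false_eq_true, List.length_cons]
    exact Nat.lt_succ_of_le (List.length_filter_le _ t)
  · simp only [List.filter_cons, beq_self_eq_true, Bool.not_true, if_neg, Bool.false_eq_true,
      not_false_eq_true, List.length_cons]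
    exact Nat.lt_succ_of_le (List.length_filter_le _ t)

def find_majority_answer_alt (answers : List (List String)) : List String :=
  if answers.length = 0 then []   -- Python: raise ValueError (excluded by Pre_)
  else
    match (pvBestLoop 0 none answers).2 with
    | some a => a
    | none => []                  -- Python's None: unreachable on nonempty input

-- ===== PRECONDITION & SPEC =====
-- Pre_ excludes exactly the empty list, on which both Pythons raise ValueError.
def Pre_find_majority_answer (answers : List (List String)) : Prop := answers ≠ []
instance (answers : List (List String)) : Decidable (Pre_find_majority_answer answers) := by unfold Pre_find_majority_answer; infer_instance
def pvWitness_find_majority_answer : List (List String) := [["a", "b"], ["b", "a"], ["c"]]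

def Spec_find_majority_answer (answers : List (List String)) (out : List String) : Prop := out = find_majority_answer_alt answers
instance (answers : List (List String)) (out : List String) : Decidable (Spec_find_majority_answer answers out) := by unfold Spec_find_majority_answer; infer_instance

-- ===== CLAIM (what is proved, stated in full; the proofs are below) =====
def Claim_equal_find_majority_answer : Prop := ∀ (answers : List (List String)), Dom_find_majority_answer answers → Pre_find_majority_answer answers → Spec_find_majority_answer answers (find_majority_answer answers)

-- ===== LEMMAS AND PROOFS =====

-- The second accumulator of A's loop: first answer seen for each canonical form.
theorem pv_orig_get? (l : List (List String)) (o : PySem.Dict (List String) (List String)) (c : List String) :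
    (l.foldl (fun d a => if d.contains (pvCanon a) then d else d.insert (pvCanon a) a) o).get? c
      = (o.get? c).or (l.find? (fun a => pvCanon a == c)) := by
  induction l generalizing o with
  | nil => simp
  | cons a t ih =>
    rw [List.foldl_cons]
    by_cases h : PySem.Dict.contains o (pvCanon a) = true
    · rw [if_pos h, ih]
      by_cases hc : pvCanon a = c
      · subst hc
        have hs : (PySem.Dict.get? o (pvCanon a)).isSome := by
          rw [← PySem.Dict.contains_eq_isSome_get?]; exact h
        obtain ⟨v, hv⟩ := Option.isSome_iff_exists.mp hs
        rw [hv, Option.some_or, Option.some_or]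
      · rw [List.find?_cons_of_neg (by simp [hc])]
    · rw [if_neg h, ih]
      have hn : PySem.Dict.get? o (pvCanon a) = none := by
        cases hgo : PySem.Dict.get? o (pvCanon a) with
        | none => rfl
        | some v =>
          exact absurd (by rw [PySem.Dict.contains_eq_isSome_get?, hgo]; rfl) h
      by_cases hc : pvCanon a = c
      · subst hc
        rw [PySem.Dict.get?_insert, if_pos rfl, hn, Option.some_or, Option.none_or,
          List.find?_cons_of_pos (by simp)]
      · rw [PySem.Dict.get?_insert, if_neg (fun e => hc e.symm),
          List.find?_cons_of_neg (by simp [hc])]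

-- find? over a Python set in first-insertion order is find? over the source list
theorem pv_find?_discard (s : List (List String)) (x : List String) (q : List String → Bool) (hx : q x = false) :
    (PySem.Set.discard s x).find? q = s.find? q := by
  unfold PySem.Set.discard
  induction s with
  | nil => rfl
  | cons a t ih =>
    rw [List.filter_cons]
    by_cases h : a = x
    · subst h
      rw [if_neg (by simp), ih, List.find?_cons_of_neg (by simp [hx])]
    · rw [if_pos (by simp [h])]
      cases hq : q a with
      | true => rw [List.find?_cons_of_pos hq, List.find?_cons_of_pos hq]
      | false => rw [List.find?_cons_of_neg (by simp [hq]), List.find?_cons_of_neg (by simp [hq]), ih]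

theorem pv_find?_ofList (xs : List (List String)) (q : List String → Bool) :
    (PySem.Set.ofList xs).find? q = xs.find? q := by
  induction xs with
  | nil => rfl
  | cons a t ih =>
    rw [PySem.Set.ofList_cons]
    cases hq : q a with
    | false =>
      rw [List.find?_cons_of_neg (by simp [hq]), List.find?_cons_of_neg (by simp [hq]),
        pv_find?_discard _ _ _ hq, ih]
    | true => rw [List.find?_cons_of_pos hq, List.find?_cons_of_pos hq]

-- counting a canonical form is measuring the corresponding filter
theorem pv_count_filter (l : List (List String)) (c : List String) :
    List.count c (l.map pvCanon) = (l.filter (fun a => pvCanon a == c)).length := by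
  induction l with
  | nil => rfl
  | cons a t ih =>
    rw [List.map_cons, List.count_cons, List.filter_cons]
    by_cases h : pvCanon a = c
    · simp [h, ih]
    · simp [h, ih]

-- removing a foreign whole group does not change a canon's count
theorem pv_count_filter_ne (l : List (List String)) (c d : List String) (h : d ≠ c) :
    List.count d ((l.filter (fun a => !(pvCanon a == c))).map pvCanon)
      = List.count d (l.map pvCanon) := by
  induction l with
  | nil => rfl
  | cons a t ih =>
    rw [List.filter_cons]
    by_cases hac : pvCanon a = c
    · have hcd : ¬ (pvCanon a = d) := fun e => h (e.symm.trans hac)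
      rw [if_neg (by simp [hac])]
      simp [ih, hcd]
    · rw [if_pos (by simp [hac])]
      simp [List.count_cons, ih]

-- a find? may skip elements on which the predicate is false
theorem pv_find?_filter (l : List (List String)) (q pred : List String → Bool)
    (h : ∀ a ∈ l, q a = false → pred a = false) :
    l.find? pred = (l.filter q).find? pred := by
  induction l with
  | nil => rfl
  | cons a t ih =>
    rw [List.filter_cons]
    by_cases hq : q a = true
    · rw [if_pos hq]
      cases hp : pred a with
      | true => rw [List.find?_cons_of_pos hp, List.find?_cons_of_pos hp]
      | false =>
        rw [List.find?_cons_of_neg (by simp [hp]), List.find?_cons_of_neg (by simp [hp])]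
        exact ih (fun b hb => h b (List.mem_cons_of_mem a hb))
    · rw [if_neg hq]
      have hp : pred a = false := h a List.mem_cons_self (Bool.not_eq_true _ ▸ (by simpa using hq))
      rw [List.find?_cons_of_neg (by simp [hp])]
      exact ih (fun b hb => h b (List.mem_cons_of_mem a hb))

theorem pv_find?_congr (l : List (List String)) (p q : List String → Bool)
    (h : ∀ a ∈ l, p a = q a) : l.find? p = l.find? q := by
  induction l with
  | nil => rfl
  | cons a t ih =>
    have ha := h a List.mem_cons_self
    cases hp : p a with
    | true =>
      rw [List.find?_cons_of_pos hp, List.find?_cons_of_pos (ha ▸ hp)]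
    | false =>
      rw [List.find?_cons_of_neg (by simp [hp]), List.find?_cons_of_neg (by simp [← ha, hp])]
      exact ih (fun b hb => h b (List.mem_cons_of_mem a hb))

-- the invariant of B's loop: the running best only grows, it dominates every
-- count seen, and the final answer is either the initial best (nothing beat it)
-- or the first element whose count attains the final best, which is attained
theorem pvBestLoop_spec : ∀ (n : Nat) (l : List (List String)), l.length = n →
    ∀ (bc : Nat) (ba : Option (List String)),
    (bc ≤ (pvBestLoop bc ba l).1) ∧
    (∀ y ∈ l, List.count (pvCanon y) (l.map pvCanon) ≤ (pvBestLoop bc ba l).1) ∧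
    ((pvBestLoop bc ba l = (bc, ba) ∧
        ∀ y ∈ l, List.count (pvCanon y) (l.map pvCanon) ≤ bc) ∨
     (bc < (pvBestLoop bc ba l).1 ∧
      l.find? (fun a => List.count (pvCanon a) (l.map pvCanon) == (pvBestLoop bc ba l).1)
        = (pvBestLoop bc ba l).2 ∧
      ∃ b ∈ l, List.count (pvCanon b) (l.map pvCanon) = (pvBestLoop bc ba l).1)) := by
  intro n
  induction n using Nat.strong_induction_on with
  | _ n ih =>
    intro l hlen bc ba
    cases l with
    | nil =>
      have h0 : pvBestLoop bc ba [] = (bc, ba) := by rw [pvBestLoop]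
      exact ⟨by rw [h0], by simp, Or.inl ⟨h0, by simp⟩⟩
    | cons x t =>
      set L := x :: t with hL
      set c := pvCanon x with hc
      set same := L.filter (fun a => pvCanon a == c) with hsame
      set others := L.filter (fun a => !(pvCanon a == c)) with hothers
      have hunfold : ∀ (b : Nat) (o : Option (List String)), pvBestLoop b o L =
          (if b < same.length then pvBestLoop same.length (some x) others
           else pvBestLoop b o others) := by
        intro b o; rw [hL, pvBestLoop]
      have hothers_lt : others.length < n := by
        have : others.length ≤ t.length := by
          rw [hothers, hL, List.filter_cons, if_neg (by simp [hc])]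
          exact List.length_filter_le _ t
        have hn : t.length + 1 = n := by simpa [hL] using hlen
        omega
      -- counts in `others` are counts in L (groups are removed whole)
      have hmem_others : ∀ y, y ∈ others ↔ (y ∈ L ∧ pvCanon y ≠ c) := by
        intro y
        rw [hothers, List.mem_filter]
        simp
      have hcnt_transfer : ∀ y ∈ others,
          List.count (pvCanon y) (others.map pvCanon) = List.count (pvCanon y) (L.map pvCanon) := by
        intro y hy
        exact pv_count_filter_ne L c (pvCanon y) ((hmem_others y).mp hy).2
      have hcnt_eq_c : ∀ y ∈ L, pvCanon y = c →
          List.count (pvCanon y) (L.map pvCanon) = same.length := by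
        intro y _ hyc; rw [hyc, pv_count_filter]
      have hcx : List.count (pvCanon x) (L.map pvCanon) = same.length :=
        hcnt_eq_c x List.mem_cons_self hc.symm
      -- generic transfer of a find? from L to others when the target beats same.length
      have hfind_transfer : ∀ (m : Nat), same.length < m →
          L.find? (fun a => List.count (pvCanon a) (L.map pvCanon) == m)
            = others.find? (fun a => List.count (pvCanon a) (others.map pvCanon) == m) := by
        intro m hm
        have h1 : L.find? (fun a => List.count (pvCanon a) (L.map pvCanon) == m)
            = others.find? (fun a => List.count (pvCanon a) (L.map pvCanon) == m) := by
          apply pv_find?_filter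
          intro a ha hqa
          have hac : pvCanon a = c := by
            by_contra hne
            simp [hne] at hqa
          have := hcnt_eq_c a ha hac
          simp [this, Nat.ne_of_lt hm]
        have h2 : others.find? (fun a => List.count (pvCanon a) (L.map pvCanon) == m)
            = others.find? (fun a => List.count (pvCanon a) (others.map pvCanon) == m) := by
          apply pv_find?_congr
          intro a ha
          rw [hcnt_transfer a ha]
        rw [h1, h2]
      by_cases hcase : bc < same.length
      · -- the front group beats the running best
        have hval : pvBestLoop bc ba L = pvBestLoop same.length (some x) others := by
          rw [hunfold, if_pos hcase]
        obtain ⟨ih0, ih1, ih2⟩ := ih others.length hothers_lt others rfl same.length (some x)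
        set r := pvBestLoop same.length (some x) others with hr
        rw [hval]
        refine ⟨Nat.le_of_lt (Nat.lt_of_lt_of_le hcase ih0), ?_, Or.inr ⟨?_, ?_, ?_⟩⟩
        · intro y hy
          by_cases hyc : pvCanon y = c
          · exact (hcnt_eq_c y hy hyc) ▸ ih0
          · have hyo : y ∈ others := (hmem_others y).mpr ⟨hy, hyc⟩
            exact (hcnt_transfer y hyo) ▸ ih1 y hyo
        · exact Nat.lt_of_lt_of_le hcase ih0
        · rcases ih2 with ⟨hre, _⟩ | ⟨hlt, hfind, _⟩
          · -- nothing in others beat same.length: r = (same.length, some x), first hit is x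
            rw [hre]
            exact List.find?_cons_of_pos (by simp [hcx])
          · rw [hfind_transfer r.1 hlt, hfind]
        · rcases ih2 with ⟨hre, _⟩ | ⟨_, _, b, hb, hbc⟩
          · exact ⟨x, List.mem_cons_self, by rw [hcx, hre]⟩
          · exact ⟨b, ((hmem_others b).mp hb).1, by rw [← hcnt_transfer b hb, hbc]⟩
      · -- the front group does not beat the running best
        have hle : same.length ≤ bc := Nat.le_of_not_lt hcase
        have hval : pvBestLoop bc ba L = pvBestLoop bc ba others := by
          rw [hunfold, if_neg hcase]
        obtain ⟨ih0, ih1, ih2⟩ := ih others.length hothers_lt others rfl bc ba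
        rw [hval]
        refine ⟨ih0, ?_, ?_⟩
        · intro y hy
          by_cases hyc : pvCanon y = c
          · exact (hcnt_eq_c y hy hyc) ▸ Nat.le_trans hle ih0
          · have hyo : y ∈ others := (hmem_others y).mpr ⟨hy, hyc⟩
            exact (hcnt_transfer y hyo) ▸ ih1 y hyo
        · rcases ih2 with ⟨hre, hall⟩ | ⟨hlt, hfind, b, hb, hbc⟩
          · refine Or.inl ⟨hre, ?_⟩
            intro y hy
            by_cases hyc : pvCanon y = c
            · exact (hcnt_eq_c y hy hyc) ▸ hle
            · have hyo : y ∈ others := (hmem_others y).mpr ⟨hy, hyc⟩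
              exact (hcnt_transfer y hyo) ▸ hall y hyo
          · refine Or.inr ⟨hlt, ?_, b, ((hmem_others b).mp hb).1, by rw [← hcnt_transfer b hb, hbc]⟩
            rw [hfind_transfer _ (Nat.lt_of_le_of_lt hle hlt), hfind]

-- A's result characterised: the maximal count M and the first answer whose
-- canonical form attains it
theorem pvA_char (l : List (List String)) (hne : l ≠ []) :
    ∃ (M : Int) (a₀ : List String),
      (∀ y ∈ l, ((List.count (pvCanon y) (l.map pvCanon) : Int)) ≤ M) ∧
      (∃ y ∈ l, ((List.count (pvCanon y) (l.map pvCanon) : Int)) = M) ∧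
      l.find? (fun a => ((List.count (pvCanon a) (l.map pvCanon) : Int)) == M) = some a₀ ∧
      find_majority_answer l = a₀ := by
  have hlen0 : ¬ (l.length = 0) := fun h => hne (List.length_eq_zero_iff.mp h)
  have hgroups : l.foldl (fun d a => PySem.Dict.modify d (pvCanon a) 0 (· + 1))
      (PySem.Dict.empty : PySem.Dict (List String) Int)
      = PySem.Dict.counter (l.map pvCanon) := by
    rw [PySem.Dict.counter_eq_foldl, List.foldl_map]
  have hsplit2 : l.foldl
      (fun s answer =>
        (PySem.Dict.modify s.1 (pvCanon answer) 0 (· + 1),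
         if PySem.Dict.contains s.2 (pvCanon answer) then s.2
         else PySem.Dict.insert s.2 (pvCanon answer) answer))
      ((PySem.Dict.empty : PySem.Dict (List String) Int),
       (PySem.Dict.empty : PySem.Dict (List String) (List String)))
      = (l.foldl (fun d a => PySem.Dict.modify d (pvCanon a) 0 (· + 1)) PySem.Dict.empty,
         l.foldl (fun d a => if PySem.Dict.contains d (pvCanon a) then d
           else PySem.Dict.insert d (pvCanon a) a) PySem.Dict.empty) :=
    PySem.List.foldl_prod_mk
      (f := fun d a => PySem.Dict.modify d (pvCanon a) 0 (· + 1))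
      (g := fun d a => if PySem.Dict.contains d (pvCanon a) then d
        else PySem.Dict.insert d (pvCanon a) a) l _ _
  unfold find_majority_answer
  rw [if_neg hlen0]
  simp only [hsplit2, hgroups]
  rcases hM : PySem.List.max? (PySem.Dict.counter (l.map pvCanon)).values (fun v => v)
    with _ | M
  · exfalso
    rw [PySem.List.max?_eq_none_iff] at hM
    simp only [PySem.Dict.values] at hM
    have hitems : (PySem.Dict.counter (l.map pvCanon)).items = [] := List.map_eq_nil_iff.mp hM
    rw [PySem.Dict.items_counter] at hitems
    have hS : PySem.Set.ofList (l.map pvCanon) = [] := List.map_eq_nil_iff.mp hitems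
    cases l with
    | nil => exact hne rfl
    | cons a t =>
      have hmem : pvCanon a ∈ PySem.Set.ofList ((a :: t).map pvCanon) := by
        rw [PySem.Set.mem_ofList]
        exact List.mem_map_of_mem List.mem_cons_self
      rw [hS] at hmem
      simp at hmem
  · have hMmem := PySem.List.max?_mem hM
    have hMmax : ∀ y ∈ (PySem.Dict.counter (l.map pvCanon)).values, y ≤ M := by
      intro y hy; exact PySem.List.max?_isMax hM y hy
    have hvals : (PySem.Dict.counter (l.map pvCanon)).values
        = (PySem.Set.ofList (l.map pvCanon)).map
            (fun k => ((List.count k (l.map pvCanon) : Int))) := by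
      simp only [PySem.Dict.values, PySem.Dict.items_counter, List.map_map]
      rfl
    rw [hvals] at hMmem hMmax
    have hbound : ∀ y ∈ l, ((List.count (pvCanon y) (l.map pvCanon) : Int)) ≤ M := by
      intro y hy
      apply hMmax
      rw [List.mem_map]
      exact ⟨pvCanon y, (PySem.Set.mem_ofList _ _).mpr (List.mem_map_of_mem hy), rfl⟩
    have hach : ∃ y ∈ l, ((List.count (pvCanon y) (l.map pvCanon) : Int)) = M := by
      rcases List.mem_map.mp hMmem with ⟨k, hkS, hkM⟩
      rcases List.mem_map.mp ((PySem.Set.mem_ofList _ _).mp hkS) with ⟨y, hy, hyk⟩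
      exact ⟨y, hy, by rw [hyk, hkM]⟩
    rcases hF : (PySem.Dict.counter (l.map pvCanon)).items.find? (fun p => p.2 == M)
      with _ | p
    · exfalso
      rw [List.find?_eq_none] at hF
      rcases hach with ⟨y, hy, hyM⟩
      exact hF (pvCanon y, (List.count (pvCanon y) (l.map pvCanon) : Int))
        (by rw [PySem.Dict.items_counter]
            exact List.mem_map_of_mem ((PySem.Set.mem_ofList _ _).mpr (List.mem_map_of_mem hy)))
        (by simp [hyM])
    · simp only [hF]
      rw [PySem.Dict.items_counter, List.find?_map, pv_find?_ofList, List.find?_map] at hF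
      obtain ⟨y, hy, hp⟩ := Option.map_eq_some_iff.mp hF
      obtain ⟨a₀, ha₀, hya⟩ := Option.map_eq_some_iff.mp hy
      subst hp
      subst hya
      dsimp only
      refine ⟨M, a₀, hbound, hach, ?_, ?_⟩
      · have := ha₀
        simpa [Function.comp] using this
      · obtain ⟨hpa, as, bs, hl, hprev⟩ := List.find?_eq_some_iff_append.mp ha₀
        simp only [Function.comp_apply, beq_iff_eq] at hpa
        have hprev' : ∀ y ∈ as, ((List.count (pvCanon y) (l.map pvCanon) : Int)) ≠ M := by
          intro y hy2
          have := hprev y hy2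
          simpa [Function.comp_apply] using this
        simp only [PySem.Dict.getD_eq_get?_getD]
        rw [pv_orig_get?]
        simp only [PySem.Dict.get?_empty, Option.none_or]
        have hAval : l.find? (fun a => pvCanon a == pvCanon a₀) = some a₀ := by
          rw [hl, List.find?_append]
          have h1 : as.find? (fun a => pvCanon a == pvCanon a₀) = none := by
            rw [List.find?_eq_none]
            intro y hy2 hbeq
            exact hprev' y hy2 (by rw [eq_of_beq hbeq]; exact hpa)
          rw [h1, Option.none_or, List.find?_cons_of_pos (by simp)]
        rw [hAval, Option.getD_some]

-- the two ports agree on every nonempty list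
theorem pv_main (l : List (List String)) (hne : l ≠ []) :
    find_majority_answer l = find_majority_answer_alt l := by
  have hlen0 : ¬ (l.length = 0) := fun h => hne (List.length_eq_zero_iff.mp h)
  obtain ⟨M, a₀, hbound, hach, hfindA, hAout⟩ := pvA_char l hne
  obtain ⟨_, hP1, hP2⟩ := pvBestLoop_spec l.length l rfl 0 none
  rcases hP2 with ⟨_, hall⟩ | ⟨_, hfindB, b, hb, hbc⟩
  · -- impossible: the head's count is positive
    exfalso
    cases l with
    | nil => exact hne rfl
    | cons x t =>
      have : 0 < List.count (pvCanon x) ((x :: t).map pvCanon) :=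
        List.count_pos_iff.mpr (List.mem_map_of_mem List.mem_cons_self)
      have := hall x List.mem_cons_self
      omega
  -- the maximal count and B's final best count coincide
  · have hMB : M = (((pvBestLoop 0 none l).1 : Nat) : Int) := by
      have h1 : M ≤ (((pvBestLoop 0 none l).1 : Nat) : Int) := by
        rcases hach with ⟨y, hy, hyM⟩
        rw [← hyM]
        exact_mod_cast hP1 y hy
      have h2 : (((pvBestLoop 0 none l).1 : Nat) : Int) ≤ M := by
        rw [← hbc]
        exact_mod_cast hbound b hb
      omega
    -- A's find? is B's find?
    have hfinds : l.find? (fun a => ((List.count (pvCanon a) (l.map pvCanon) : Int)) == M)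
        = l.find? (fun a => List.count (pvCanon a) (l.map pvCanon) == (pvBestLoop 0 none l).1) := by
      apply pv_find?_congr
      intro a _
      rw [hMB]
      by_cases hcc : List.count (pvCanon a) (l.map pvCanon) = (pvBestLoop 0 none l).1
      · simp [hcc]
      · have hcc' : ((List.count (pvCanon a) (l.map pvCanon) : Int)) ≠ ((((pvBestLoop 0 none l).1 : Nat)) : Int) := by
          exact_mod_cast hcc
        simp [hcc, hcc']
    rw [hfinds, hfindB] at hfindA
    unfold find_majority_answer_alt
    rw [if_neg hlen0, hfindA, hAout]

-- ===== VERDICT (by name: the statement is the Claim_ definition above) =====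
theorem find_majority_answer_spec : Claim_equal_find_majority_answer := by
  intro answers _ hpre
  exact pv_main answers hpre
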